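-- pv_equiv track=rewrite | github.com/StarsExpress/LeetCode-Repository | sorting/containing_set.py | find_smallest_containing_set
-- ===== SOURCE A (Python) =====
-- def _binary_search(target: int, sorted_integers: list[int], size: int) -> int:
--     if size == 0:
--         return 0
--
--     back_idx, front_idx = 0, size - 1
--     while back_idx <= front_idx:
--         mid_idx = (back_idx + front_idx) // 2
--         if sorted_integers[mid_idx] < target:
--             back_idx = mid_idx + 1
--             continue
--         front_idx = mid_idx - 1
--
--     return back_idx  # Numbers < target, implying insertion idx.
--
-- def find_smallest_containing_set(intervals: list[list[int]]) -> int:  # LeetCode Q.757.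
--     # Key: deal with more "interior-located" and smaller intervals first.
--     intervals.sort(key=lambda x: (x[1], -x[0]))  # Sort by rising end and falling start.
--     containing_set, set_size = [], 0
--     for start, end in intervals:
--         start_idx = _binary_search(start, containing_set, set_size)
--         if start_idx == set_size:  # Containing set's nums all < start.
--             containing_set.extend([end - 1, end])  # Add the biggest two nums of interval.
--             set_size += 2
--             continue
--
--         end_idx = _binary_search(end, containing_set, set_size)
--         if start_idx + 2 > end_idx:  # Set likely doesn't have 2+ nums within interval.
--             if end_idx == set_size:  # Containing set's nums all < end.
--                 containing_set.append(end)
--                 set_size += 1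
--
--             if end < containing_set[end_idx]:  # Num at set's end_idx < end.
--                 containing_set.insert(end_idx, end)
--                 set_size += 1
--
--     return set_size
-- ===== SOURCE B (Python) =====
-- def find_smallest_containing_set(intervals: list[list[int]]) -> int:  # LeetCode Q.757.
--     intervals.sort(key=lambda x: (x[1], -x[0]))  # Same in-place sort as the original.
--     # Keep only the two largest chosen points (second <= cur) and a counter.
--     count, second, cur = 0, 0, 0
--     for start, end in intervals:
--         if count == 0 or start > cur:  # Interval holds no chosen point: pick its two biggest.
--             count, second, cur = count + 2, end - 1, end
--         elif start > second and cur < end:  # Holds exactly one (cur); pick end if it is new.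
--             count, second, cur = count + 1, cur, end
--     return count
-- ===== Notes on version B (the rewrite author's own statement) =====
-- stated objective: simpler
-- what changed: After the same (end rising, start falling) sort, the sorted containing-set list with hand-written binary searches and insertions is replaced by O(1) state: a counter plus the two largest chosen points (second, cur), updated by two comparisons per interval.
-- outside the precondition, e.g. on find_smallest_containing_set([[-3, -2], [-2, -3], [-2, -3]]): A returns 4, B returns 5
import Mathlib
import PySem

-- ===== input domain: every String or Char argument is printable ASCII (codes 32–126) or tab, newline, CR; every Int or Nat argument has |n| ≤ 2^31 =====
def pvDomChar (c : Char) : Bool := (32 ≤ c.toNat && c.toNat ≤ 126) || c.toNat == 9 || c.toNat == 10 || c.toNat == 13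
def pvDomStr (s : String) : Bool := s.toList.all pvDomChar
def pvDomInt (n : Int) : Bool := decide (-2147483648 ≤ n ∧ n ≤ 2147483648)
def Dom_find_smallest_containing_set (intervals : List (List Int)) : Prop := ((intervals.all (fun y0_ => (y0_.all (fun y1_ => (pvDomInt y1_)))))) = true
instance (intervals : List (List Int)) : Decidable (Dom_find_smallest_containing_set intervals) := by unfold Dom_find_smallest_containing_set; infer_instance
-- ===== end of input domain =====

-- B replaces A's sorted containing-set list + hand-written binary search by two integers (the
-- two largest chosen points) and a counter — simpler, O(1) state after the same sort.
-- NOTE: both Pythons sort `intervals` in place; the equivalence proved here is about the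
-- return value only (B performs the same in-place sort).

-- ===== PORT A =====
-- while-loop of _binary_search; termination: front - back shrinks.
def pvBinSearchLoop (target : Int) (sorted_integers : List Int) (back front : Int) : Int :=
  if _h : back ≤ front then
    let mid := PySem.Int.floordiv (back + front) 2
    match _hg : PySem.List.pyGet? sorted_integers mid with
    | some v =>
      if v < target then pvBinSearchLoop target sorted_integers (mid + 1) front
      else pvBinSearchLoop target sorted_integers back (mid - 1)
    | none => back  -- Python would raise IndexError; unreachable in A's calls (0 ≤ back ≤ front < size)
  else back
termination_by (front + 1 - back).toNat
decreasing_by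
  · have := PySem.Int.floordiv_two_mid_bounds _h; omega
  · have := PySem.Int.floordiv_two_mid_bounds _h; omega

def pvBinarySearch (target : Int) (sorted_integers : List Int) (size : Int) : Int :=
  if size = 0 then 0
  else pvBinSearchLoop target sorted_integers 0 (size - 1)

-- loop body of A (containing_set, set_size); a non-[start,end] row makes Python raise
-- ValueError (excluded by Pre_): the port leaves the state unchanged there.
def pvStepA (st : List Int × Int) (iv : List Int) : List Int × Int :=
  match iv with
  | [start, e] =>
    let cset := st.1
    let size := st.2
    let start_idx := pvBinarySearch start cset size
    if start_idx = size then (cset ++ [e - 1, e], size + 2)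
    else
      let end_idx := pvBinarySearch e cset size
      if start_idx + 2 > end_idx then
        let st1 := if end_idx = size then (cset ++ [e], size + 1) else (cset, size)
        -- containing_set[end_idx]: always in range here (end_idx ≤ size); pyGetD default never read
        if e < PySem.List.pyGetD st1.1 end_idx 0 then
          (PySem.List.insert st1.1 end_idx e, st1.2 + 1)
        else st1
      else (cset, size)
  | _ => st

def find_smallest_containing_set (intervals : List (List Int)) : Int :=
  -- sort(key=lambda x: (x[1], -x[0])); x[1]/x[0] raise IndexError on short rows (excluded by Pre_)
  let srt := PySem.List.sorted2 intervals
    (fun x => PySem.List.pyGetD x 1 0) (fun x => -(PySem.List.pyGetD x 0 0))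
  (srt.foldl pvStepA (([] : List Int), (0 : Int))).2

-- ===== PORT B =====
-- loop body of B over (count, second, cur); non-[start,end] rows as in pvStepA.
def pvStepB (st : Int × Int × Int) (iv : List Int) : Int × Int × Int :=
  match iv with
  | [s, e] =>
    if st.1 = 0 || s > st.2.2 then (st.1 + 2, e - 1, e)
    else if s > st.2.1 && st.2.2 < e then (st.1 + 1, st.2.2, e)
    else st
  | _ => st

def find_smallest_containing_set_alt (intervals : List (List Int)) : Int :=
  let srt := PySem.List.sorted2 intervals
    (fun x => PySem.List.pyGetD x 1 0) (fun x => -(PySem.List.pyGetD x 0 0))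
  (srt.foldl pvStepB ((0, 0, 0) : Int × Int × Int)).1

-- ===== PRECONDITION & SPEC =====
-- Pre_ excludes rows that are not [start, end] pairs (Python raises unpacking them) and
-- inputs holding two empty intervals (start > end, impossible under LeetCode 757's
-- constraint start < end) that share the same end: on those A's containing-set list can
-- lose its sortedness, after which its binary-search counts are accidental artefacts of
-- the list layout, while B keeps counting naturally.
def Pre_find_smallest_containing_set (intervals : List (List Int)) : Prop :=
  (∀ iv ∈ intervals, iv.length = 2) ∧
  intervals.Pairwise (fun r1 r2 =>
    ¬ (PySem.List.pyGetD r1 1 0 = PySem.List.pyGetD r2 1 0 ∧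
       PySem.List.pyGetD r1 1 0 < PySem.List.pyGetD r1 0 0 ∧
       PySem.List.pyGetD r2 1 0 < PySem.List.pyGetD r2 0 0))
instance (intervals : List (List Int)) : Decidable (Pre_find_smallest_containing_set intervals) := by
  unfold Pre_find_smallest_containing_set; infer_instance

def pvWitness_find_smallest_containing_set : List (List Int) := [[0, 2], [1, 3]]

def Spec_find_smallest_containing_set (intervals : List (List Int)) (out : Int) : Prop := out = find_smallest_containing_set_alt intervals
instance (intervals : List (List Int)) (out : Int) : Decidable (Spec_find_smallest_containing_set intervals out) := by unfold Spec_find_smallest_containing_set; infer_instance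

-- ===== CLAIM (what is proved, stated in full; the proofs are below) =====
def Claim_equal_find_smallest_containing_set : Prop := ∀ (intervals : List (List Int)), Dom_find_smallest_containing_set intervals → Pre_find_smallest_containing_set intervals → Spec_find_smallest_containing_set intervals (find_smallest_containing_set intervals)

-- ===== LEMMAS AND PROOFS =====

-- the sort order produced by the shared sort, on [s,e] rows: end rising, start falling
def pvKey1 (x : List Int) : Int := PySem.List.pyGetD x 1 0
def pvKey2 (x : List Int) : Int := -(PySem.List.pyGetD x 0 0)
def pvR (a b : List Int) : Prop :=
  pvKey1 a < pvKey1 b ∨ (pvKey1 a = pvKey1 b ∧ pvKey2 a ≤ pvKey2 b)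

-- the "no bad pair" relation of Pre_ (no two empty intervals share an end)
def pvNP (r1 r2 : List Int) : Prop :=
  ¬ (PySem.List.pyGetD r1 1 0 = PySem.List.pyGetD r2 1 0 ∧
     PySem.List.pyGetD r1 1 0 < PySem.List.pyGetD r1 0 0 ∧
     PySem.List.pyGetD r2 1 0 < PySem.List.pyGetD r2 0 0)

-- sorted2 with keys k1, k2 is sorted with the lexicographic key
lemma pv_sorted2_eq_sorted_lex (xs : List (List Int)) (k1 k2 : List Int → Int) :
    PySem.List.sorted2 xs k1 k2 =
      PySem.List.sorted xs (fun x => (toLex (k1 x, k2 x) : Int ×ₗ Int)) := by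
  unfold PySem.List.sorted2 PySem.List.sorted
  simp only [if_neg (by decide : ¬ (false = true))]
  have hb : (fun a b => decide (k1 a < k1 b) || !decide (k1 b < k1 a) && decide (k2 a < k2 b)) =
      (fun a b => decide ((fun x => (toLex (k1 x, k2 x) : Int ×ₗ Int)) a < (fun x => (toLex (k1 x, k2 x) : Int ×ₗ Int)) b)) := by
    funext a b
    rcases lt_trichotomy (k1 a) (k1 b) with h | h | h <;>
      simp [Prod.Lex.lt_iff, h, not_lt_of_gt]
  rw [hb]

lemma pv_sorted2_pairwise (xs : List (List Int)) :
    (PySem.List.sorted2 xs pvKey1 pvKey2).Pairwise pvR := by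
  rw [pv_sorted2_eq_sorted_lex]
  have h := PySem.List.sorted_pairwise xs (fun x => (toLex (pvKey1 x, pvKey2 x) : Int ×ₗ Int))
  exact h.imp (fun {a b} hab => by simpa [Prod.Lex.le_iff, pvR] using hab)

-- Pre_'s pairwise condition survives the sort (pvNP is symmetric)
lemma pv_sorted2_np (xs : List (List Int))
    (h : xs.Pairwise (fun r1 r2 =>
      ¬ (PySem.List.pyGetD r1 1 0 = PySem.List.pyGetD r2 1 0 ∧
         PySem.List.pyGetD r1 1 0 < PySem.List.pyGetD r1 0 0 ∧
         PySem.List.pyGetD r2 1 0 < PySem.List.pyGetD r2 0 0))) :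
    (PySem.List.sorted2 xs pvKey1 pvKey2).Pairwise pvNP := by
  have hsym : Symmetric pvNP := by
    intro a b hab
    unfold pvNP at *
    tauto
  exact ((PySem.List.sorted2_perm xs pvKey1 pvKey2 false).pairwise_iff (fun hab => hsym hab)).mpr h

lemma pv_getD_append (xs : List Int) (v : Int) :
    PySem.List.pyGetD (xs ++ [v]) ((xs.length : Nat) : Int) 0 = v := by
  simp [List.getD_eq_getElem?_getD]

lemma pv_getD_idx (l : List Int) (k : Nat) (hk : k < l.length) :
    PySem.List.pyGetD l ((k : Nat) : Int) 0 = l[k] := by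
  simp [List.getD_eq_getElem?_getD, List.getElem?_eq_getElem hk]

-- countP over pre ++ [second, cur], pre ≤ second ≤ cur
lemma pv_cnt_all (pre : List Int) (second cur t : Int)
    (hps : ∀ x ∈ pre, x ≤ second) (hsc : second ≤ cur) (ht : cur < t) :
    (pre ++ [second, cur]).countP (fun x => decide (x < t)) = pre.length + 2 := by
  have : ∀ x ∈ pre ++ [second, cur], x < t := by
    intro x hx
    rcases List.mem_append.mp hx with hx | hx
    · exact lt_of_le_of_lt (le_trans (hps x hx) hsc) ht
    · rcases List.mem_pair.mp hx with rfl | rfl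
      · exact lt_of_le_of_lt hsc ht
      · exact ht
  rw [List.countP_eq_length.mpr (fun x hx => by simpa using this x hx)]
  simp

lemma pv_cnt_mid (pre : List Int) (second cur t : Int)
    (hps : ∀ x ∈ pre, x ≤ second) (hst : second < t) (htc : t ≤ cur) :
    (pre ++ [second, cur]).countP (fun x => decide (x < t)) = pre.length + 1 := by
  rw [List.countP_append]
  have h1 : pre.countP (fun x => decide (x < t)) = pre.length :=
    List.countP_eq_length.mpr (fun x hx => by simp [lt_of_le_of_lt (hps x hx) hst])
  have h2 : ([second, cur]).countP (fun x => decide (x < t)) = 1 := by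
    simp [hst, not_lt.mpr htc]
  omega

lemma pv_cnt_lo (pre : List Int) (second cur t : Int) (hts : t ≤ second) (hsc : second ≤ cur) :
    (pre ++ [second, cur]).countP (fun x => decide (x < t)) ≤ pre.length := by
  rw [List.countP_append]
  have h2 : ([second, cur]).countP (fun x => decide (x < t)) = 0 := by
    simp [not_lt.mpr hts, not_lt.mpr (le_trans hts hsc)]
  have := List.countP_le_length (l := pre) (p := fun x => decide (x < t))
  omega

lemma pv_cnt_le (pre : List Int) (second cur t : Int) (htc : t ≤ cur) :
    (pre ++ [second, cur]).countP (fun x => decide (x < t)) ≤ pre.length + 1 := by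
  rw [List.countP_append]
  have h2 : ([second, cur]).countP (fun x => decide (x < t)) ≤ 1 := by
    simp only [List.countP_cons, List.countP_nil, not_lt.mpr htc]
    rcases Classical.em (second < t) with h | h <;> simp [h]
  have := List.countP_le_length (l := pre) (p := fun x => decide (x < t))
  omega

-- in a nondecreasing list, the element at index countP (< t) is ≥ t
lemma pv_countP_getElem (l : List Int) (t : Int) (hs : l.Pairwise (· ≤ ·))
    (h : l.countP (fun x => decide (x < t)) < l.length) :
    t ≤ l[l.countP (fun x => decide (x < t))]'h := by
  set k := l.countP (fun x => decide (x < t)) with hk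
  by_contra hc
  have hlt : l[k]'h < t := not_le.mp hc
  have hall : ∀ x ∈ l.take (k + 1), decide (x < t) = true := by
    intro x hx
    obtain ⟨i, hi, rfl⟩ := List.mem_take_iff_getElem.mp hx
    have hi' : i ≤ k := by omega
    rcases Nat.lt_or_ge i k with hik | hik
    · have := List.pairwise_iff_getElem.mp hs i k (by omega) h hik
      simpa using lt_of_le_of_lt this hlt
    · have : i = k := by omega
      subst this
      simpa using hlt
  have h1 : (l.take (k + 1)).countP (fun x => decide (x < t)) = k + 1 := by
    rw [List.countP_eq_length.mpr hall, List.length_take]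
    omega
  have h2 : l.countP (fun x => decide (x < t)) =
      (l.take (k + 1)).countP (fun x => decide (x < t)) +
      (l.drop (k + 1)).countP (fun x => decide (x < t)) := by
    rw [← List.countP_append, List.take_append_drop]
  omega

lemma pv_countP_eq (l : List Int) (t : Int) (k : Nat) (hk : k ≤ l.length)
    (h : ∀ i (hi : i < l.length), l[i] < t ↔ i < k) :
    l.countP (fun x => decide (x < t)) = k := by
  induction l generalizing k with
  | nil => simp only [List.countP_nil, List.length_nil] at *; omega
  | cons x xs ih =>
    rw [List.countP_cons]
    cases k with
    | zero =>
      have hx : ¬ x < t := by have := h 0 (by simp); simpa using this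
      have hxs : xs.countP (fun x => decide (x < t)) = 0 := by
        rw [List.countP_eq_zero]
        intro a ha
        obtain ⟨i, hi, rfl⟩ := List.mem_iff_getElem.mp ha
        have := h (i+1) (by simpa using hi)
        simpa using this
      simp [hx, hxs]
    | succ k' =>
      have hx : x < t := by have := h 0 (by simp); simpa using this
      have := ih k' (by simpa using hk) (fun i hi => by
        have := h (i+1) (by simpa using Nat.succ_lt_succ hi)
        simpa using this)
      simp [hx, this]

-- the binary-search loop returns the number of elements < target
lemma pv_loop_eq (t : Int) (l : List Int) (back front : Int) :
    l.Pairwise (· ≤ ·) → 0 ≤ back → back ≤ (l.length : Int) →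
    front < (l.length : Int) →
    (∀ i : Nat, (i : Int) < back → ∀ hi : i < l.length, l[i] < t) →
    (∀ i : Nat, front < (i : Int) → ∀ hi : i < l.length, t ≤ l[i]) →
    pvBinSearchLoop t l back front = ((l.countP (fun x => decide (x < t)) : Nat) : Int) := by
  fun_induction pvBinSearchLoop t l back front with
  | case1 back front _h mid v _hg hvt ih =>
    intro hs h0 hbl hf hlo hhi
    have hmb := PySem.Int.floordiv_two_mid_bounds _h
    have hmn : 0 ≤ mid := le_trans h0 hmb.1
    rw [PySem.List.pyGet?_of_nonneg l hmn] at _hg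
    have hml : mid.toNat < l.length := by
      rcases h : l[mid.toNat]? with _ | w
      · rw [h] at _hg; cases _hg
      · exact (List.getElem?_eq_some_iff.mp h).1
    have hv : l[mid.toNat] = v := by
      rw [List.getElem?_eq_getElem hml] at _hg; exact Option.some.inj _hg
    apply ih hs (by omega) (by omega) hf _ hhi
    intro i hi hil
    have : l[i] ≤ l[mid.toNat] := by
      rcases Nat.lt_or_ge i mid.toNat with hc | hc
      · exact List.pairwise_iff_getElem.mp hs i mid.toNat hil hml hc
      · have : i = mid.toNat := by omega
        subst this; exact le_refl _
    calc l[i] ≤ l[mid.toNat] := this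
      _ = v := hv
      _ < t := hvt
  | case2 back front _h mid v _hg hvt ih =>
    intro hs h0 hbl hf hlo hhi
    have hmb := PySem.Int.floordiv_two_mid_bounds _h
    have hmn : 0 ≤ mid := le_trans h0 hmb.1
    rw [PySem.List.pyGet?_of_nonneg l hmn] at _hg
    have hml : mid.toNat < l.length := by
      rcases h : l[mid.toNat]? with _ | w
      · rw [h] at _hg; cases _hg
      · exact (List.getElem?_eq_some_iff.mp h).1
    have hv : l[mid.toNat] = v := by
      rw [List.getElem?_eq_getElem hml] at _hg; exact Option.some.inj _hg
    apply ih hs h0 hbl (by omega) hlo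
    intro i hi hil
    have hge : l[mid.toNat] ≤ l[i] := by
      rcases Nat.lt_or_ge mid.toNat i with hc | hc
      · exact List.pairwise_iff_getElem.mp hs mid.toNat i hml hil hc
      · have : i = mid.toNat := by omega
        subst this; exact le_refl _
    have : t ≤ v := not_lt.mp hvt
    calc t ≤ v := this
      _ = l[mid.toNat] := hv.symm
      _ ≤ l[i] := hge
  | case3 back front _h mid _hg =>
    intro hs h0 hbl hf hlo hhi
    exfalso
    have hmb := PySem.Int.floordiv_two_mid_bounds _h
    rw [PySem.List.pyGet?_eq_none_iff] at _hg
    exact _hg (by unfold PySem.Raise.InRange; omega)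
  | case4 back front _h =>
    intro hs h0 hbl hf hlo hhi
    have : l.countP (fun x => decide (x < t)) = back.toNat := by
      apply pv_countP_eq l t back.toNat (by omega)
      intro i hi
      constructor
      · intro hlt
        by_contra hc
        have : back ≤ (i : Int) := by omega
        have := hhi i (by omega) hi
        omega
      · intro hik
        exact hlo i (by omega) hi
    rw [this]; omega

lemma pv_bs_eq (t : Int) (l : List Int) (hs : l.Pairwise (· ≤ ·)) :
    pvBinarySearch t l (l.length : Int) = ((l.countP (fun x => decide (x < t)) : Nat) : Int) := by
  unfold pvBinarySearch
  rcases eq_or_ne l [] with rfl | hne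
  · simp
  · have hl : 0 < l.length := List.length_pos_iff.mpr hne
    rw [if_neg (by omega : ¬ ((l.length : Int) = 0))]
    apply pv_loop_eq t l 0 ((l.length : Int) - 1) hs le_rfl (by omega) (by omega)
    · intro i hi _; omega
    · intro i hi hil; omega

-- invariant tying A's containing set to B's (count, second, cur) against the remaining rows
def pvInv (cset : List Int) (count second cur : Int) (L : List (List Int)) : Prop :=
  cset.Pairwise (· ≤ ·) ∧ (cset.length : Int) = count ∧
  ((cset = [] ∧ count = 0) ∨
    (∃ pre, cset = pre ++ [second, cur] ∧ (∀ x ∈ pre, x ≤ second) ∧ second ≤ cur ∧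
      (∀ iv ∈ L, ∀ s e : Int, iv = [s, e] → cur ≤ e ∧ (cur = e → s ≤ e))))

lemma pv_fold_agree (L : List (List Int)) :
    ∀ cset count second cur,
    (∀ iv ∈ L, ∃ s e : Int, iv = [s, e]) →
    L.Pairwise pvR →
    L.Pairwise pvNP →
    pvInv cset count second cur L →
    (L.foldl pvStepA (cset, count)).2 = (L.foldl pvStepB (count, second, cur)).1 := by
  induction L with
  | nil => intro cset count second cur _ _ _ _; rfl
  | cons iv L' ih =>
    intro cset count second cur hshape hpw hnp hinv
    obtain ⟨s, e, rfl⟩ := hshape iv List.mem_cons_self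
    have hshape' : ∀ iv ∈ L', ∃ s e : Int, iv = [s, e] :=
      fun iv hm => hshape iv (List.mem_cons_of_mem _ hm)
    have hpR : ∀ b ∈ L', pvR [s, e] b := (List.pairwise_cons.mp hpw).1
    have hpw' : L'.Pairwise pvR := (List.pairwise_cons.mp hpw).2
    have hnpH : ∀ b ∈ L', pvNP [s, e] b := (List.pairwise_cons.mp hnp).1
    have hnp' : L'.Pairwise pvNP := (List.pairwise_cons.mp hnp).2
    -- what the sort order and Pre_ give about later rows
    have hpR' : ∀ iv' ∈ L', ∀ s' e' : Int, iv' = [s', e'] → e ≤ e' ∧ (e = e' → s' ≤ s) := by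
      intro iv' hm' s' e' hiv'
      subst hiv'
      rcases hpR _ hm' with h | ⟨h1, h2⟩
      · have : e < e' := h
        exact ⟨le_of_lt this, fun he => absurd he (ne_of_lt this)⟩
      · have he : e = e' := h1
        have hs : s' ≤ s := by have : -s ≤ -s' := h2; omega
        exact ⟨le_of_eq he, fun _ => hs⟩
    -- the clause that survives setting cur := e at this row
    have hclause' : ∀ iv' ∈ L', ∀ s' e' : Int, iv' = [s', e'] → e ≤ e' ∧ (e = e' → s' ≤ e') := by
      intro iv' hm' s' e' hiv'
      obtain ⟨h1, h2⟩ := hpR' iv' hm' s' e' hiv'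
      refine ⟨h1, fun he => ?_⟩
      by_contra hc
      have hnp1 := hnpH _ hm'
      subst hiv'
      have : ¬ (e = e' ∧ e < s ∧ e' < s') := hnp1
      have hs' : e' < s' := by omega
      have hse : ¬ e < s := fun hx => this ⟨he, hx, hs'⟩
      have := h2 he
      omega
    obtain ⟨hpwset, hlen, hcase⟩ := hinv
    rw [List.foldl_cons, List.foldl_cons]
    rcases hcase with ⟨rfl, rfl⟩ | ⟨pre, rfl, hps, hsc, hcl⟩
    · -- empty containing set
      have hA : pvStepA ([], 0) [s, e] = ([e - 1, e], 2) := by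
        simp [pvStepA, pvBinarySearch]
      have hB : pvStepB (0, second, cur) [s, e] = (2, e - 1, e) := by
        simp [pvStepB]
      rw [hA, hB]
      apply ih _ _ _ _ hshape' hpw' hnp'
      refine ⟨by simp, by simp, Or.inr ⟨[], by simp, by simp, by omega, ?_⟩⟩
      intro iv' hm' s' e' hiv'
      obtain ⟨h1, h2⟩ := hclause' iv' hm' s' e' hiv'
      exact ⟨h1, fun _ => by omega⟩
    · -- cset = pre ++ [second, cur]
      have hle_cur : ∀ x ∈ pre ++ [second, cur], x ≤ cur := by
        intro x hx
        rcases List.mem_append.mp hx with hx | hx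
        · exact le_trans (hps x hx) hsc
        · rcases List.mem_pair.mp hx with rfl | rfl
          · exact hsc
          · exact le_rfl
      obtain ⟨hcur_e, hcur_eq⟩ := hcl [s, e] List.mem_cons_self s e rfl
      have hlen' : count = ((pre.length + 2 : Nat) : Int) := by
        rw [← hlen]; simp
      have hbs : ∀ t : Int, pvBinarySearch t (pre ++ [second, cur]) count =
          (((pre ++ [second, cur]).countP (fun x => decide (x < t)) : Nat) : Int) := by
        intro t
        rw [hlen', show ((pre.length + 2 : Nat) : Int) = (((pre ++ [second, cur]).length : Nat) : Int) by simp]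
        exact pv_bs_eq t _ hpwset
      by_cases hB1 : cur < s
      · -- add two points
        have hcur_lt_e : cur < e := by
          rcases lt_or_eq_of_le hcur_e with h | h
          · exact h
          · have := hcur_eq h; omega
        have hA : pvStepA (pre ++ [second, cur], count) [s, e] =
            ((pre ++ [second, cur]) ++ [e - 1, e], count + 2) := by
          simp only [pvStepA]
          rw [hbs s, pv_cnt_all pre second cur s hps hsc hB1, hlen']
          rw [if_pos (rfl : ((pre.length + 2 : Nat) : Int) = ((pre.length + 2 : Nat) : Int))]
        have hB : pvStepB (count, second, cur) [s, e] = (count + 2, e - 1, e) := by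
          simp [pvStepB, hB1]
        rw [hA, hB]
        apply ih _ _ _ _ hshape' hpw' hnp'
        refine ⟨?_, by simp [hlen']; omega, Or.inr ⟨pre ++ [second, cur], rfl, ?_, by omega, ?_⟩⟩
        · rw [List.pairwise_append]
          refine ⟨hpwset, by simp, ?_⟩
          intro x hx y hy
          have hxc := hle_cur x hx
          rcases List.mem_pair.mp hy with rfl | rfl <;> omega
        · intro x hx
          have := hle_cur x hx; omega
        · intro iv' hm' s' e' hiv'
          exact hclause' iv' hm' s' e' hiv'
      · by_cases hB2 : second < s ∧ cur < e
        · -- add one point: e appended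
          obtain ⟨hB2s, hB2e⟩ := hB2
          have hs_le_cur : s ≤ cur := not_lt.mp hB1
          have hA : pvStepA (pre ++ [second, cur], count) [s, e] =
              ((pre ++ [second, cur]) ++ [e], count + 1) := by
            simp only [pvStepA]
            rw [hbs s, pv_cnt_mid pre second cur s hps hB2s hs_le_cur,
              hbs e, pv_cnt_all pre second cur e hps hsc hB2e, hlen']
            rw [if_neg (show ¬ (((pre.length + 1 : Nat)) : Int) = ((pre.length + 2 : Nat) : Int) by omega)]
            rw [if_pos (show (((pre.length + 1 : Nat)) : Int) + 2 > ((pre.length + 2 : Nat) : Int) by omega)]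
            rw [if_pos (rfl : ((pre.length + 2 : Nat) : Int) = ((pre.length + 2 : Nat) : Int))]
            have hg : PySem.List.pyGetD ((pre ++ [second, cur]) ++ [e]) ((pre.length + 2 : Nat) : Int) 0 = e := by
              simpa using pv_getD_append (pre ++ [second, cur]) e
            rw [hg, if_neg (lt_irrefl e)]
          have hB : pvStepB (count, second, cur) [s, e] = (count + 1, cur, e) := by
            simp [pvStepB, not_lt.mpr hs_le_cur, hB2s, hB2e, show ¬ count = 0 by omega]
          rw [hA, hB]
          apply ih _ _ _ _ hshape' hpw' hnp'
          refine ⟨?_, by simp [hlen']; omega, Or.inr ⟨pre ++ [second], by simp, ?_, le_of_lt hB2e, ?_⟩⟩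
          · rw [List.pairwise_append]
            refine ⟨hpwset, by simp, ?_⟩
            intro x hx y hy
            simp at hy; subst hy
            exact le_trans (hle_cur x hx) (le_of_lt hB2e)
          · intro x hx
            rcases List.mem_append.mp hx with hx | hx
            · exact le_trans (hps x hx) hsc
            · simp at hx; omega
          · intro iv' hm' s' e' hiv'
            exact hclause' iv' hm' s' e' hiv'
        · -- no new points
          have hs_le_cur : s ≤ cur := not_lt.mp hB1
          have hcnt_le := pv_cnt_le pre second cur s hs_le_cur
          have hA : pvStepA (pre ++ [second, cur], count) [s, e] =
              (pre ++ [second, cur], count) := by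
            simp only [pvStepA]
            rw [hbs s, hbs e, hlen']
            rw [if_neg (show ¬ ((((pre ++ [second, cur]).countP (fun x => decide (x < s)) : Nat)) : Int) = ((pre.length + 2 : Nat) : Int) by
              have := hcnt_le; omega)]
            rcases lt_or_eq_of_le hcur_e with h | h
            · -- cur < e and s ≤ second: two old points still inside
              have hss : s ≤ second := by
                by_contra hc
                exact hB2 ⟨not_le.mp hc, h⟩
              rw [pv_cnt_all pre second cur e hps hsc h]
              rw [if_neg (show ¬ ((((pre ++ [second, cur]).countP (fun x => decide (x < s)) : Nat)) : Int) + 2 > ((pre.length + 2 : Nat) : Int) by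
                have := pv_cnt_lo pre second cur s hss hsc; omega)]
            · -- cur = e: the point e is already chosen, A inserts nothing
              have hecur : e ≤ cur := le_of_eq h.symm
              have hcnt_e_le := pv_cnt_le pre second cur e hecur
              by_cases hgt : ((((pre ++ [second, cur]).countP (fun x => decide (x < s)) : Nat)) : Int) + 2 > (((pre ++ [second, cur]).countP (fun x => decide (x < e)) : Nat) : Int)
              · rw [if_pos hgt]
                rw [if_neg (show ¬ ((((pre ++ [second, cur]).countP (fun x => decide (x < e)) : Nat)) : Int) = ((pre.length + 2 : Nat) : Int) by
                  have := hcnt_e_le; omega)]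
                have hklt : (pre ++ [second, cur]).countP (fun x => decide (x < e)) < (pre ++ [second, cur]).length := by
                  have := hcnt_e_le
                  simp only [List.length_append, List.length_cons, List.length_nil]
                  omega
                have hge := pv_countP_getElem (pre ++ [second, cur]) e hpwset hklt
                have hmem : (pre ++ [second, cur])[(pre ++ [second, cur]).countP (fun x => decide (x < e))]'hklt ∈ pre ++ [second, cur] :=
                  List.getElem_mem hklt
                have hle := hle_cur _ hmem
                have heq : (pre ++ [second, cur])[(pre ++ [second, cur]).countP (fun x => decide (x < e))]'hklt = e := by
                  omega
                rw [pv_getD_idx (pre ++ [second, cur]) _ hklt, heq, if_neg (lt_irrefl e)]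
              · rw [if_neg hgt]
          have hB : pvStepB (count, second, cur) [s, e] = (count, second, cur) := by
            have : ¬ (second < s ∧ cur < e) := hB2
            rcases Classical.em (second < s) with hs1 | hs1
            · have he1 : ¬ cur < e := fun hc => this ⟨hs1, hc⟩
              simp [pvStepB, not_lt.mpr hs_le_cur, he1, show ¬ count = 0 by omega]
            · simp [pvStepB, not_lt.mpr hs_le_cur, hs1, show ¬ count = 0 by omega]
          rw [hA, hB]
          apply ih _ _ _ _ hshape' hpw' hnp'
          refine ⟨hpwset, hlen, Or.inr ⟨pre, rfl, hps, hsc, ?_⟩⟩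
          intro iv' hm' s' e' hiv'
          exact hcl iv' (List.mem_cons_of_mem _ hm') s' e' hiv'

-- ===== VERDICT (by name: the statement is the Claim_ definition above) =====
theorem find_smallest_containing_set_spec : Claim_equal_find_smallest_containing_set := by
  intro intervals _hDom hPre
  obtain ⟨hlen2, hnp0⟩ := hPre
  unfold Spec_find_smallest_containing_set find_smallest_containing_set find_smallest_containing_set_alt
  apply pv_fold_agree
  · intro iv hm
    have h2 := hlen2 iv ((PySem.List.sorted2_perm intervals pvKey1 pvKey2 false).mem_iff.mp hm)
    match iv, h2 with
    | [a, b], _ => exact ⟨a, b, rfl⟩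
  · exact pv_sorted2_pairwise intervals
  · exact pv_sorted2_np intervals hnp0
  · exact ⟨List.Pairwise.nil, rfl, Or.inl ⟨rfl, rfl⟩⟩
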